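-- pv_equiv track=rewrite | github.com/cyberLaVoy/kattis | python3/rotateAndCut.py | rotateAndCut
-- ===== SOURCE A (Python) =====
-- def rotateAndCut(message, numRepeats):
--     leftCuts = 0
--     rightCuts = 0
--     cutSize = int(len(message)*.25)
--     remainder = len(message) - cutSize
--     for i in range(numRepeats):
--         if cutSize == 0:
--             break
--         if i & 1 == 0:
--             leftCuts += cutSize
--         else:
--             rightCuts += cutSize
--         cutSize = int(remainder*.25)
--         remainder = remainder - cutSize
--     return message[leftCuts:len(message)-rightCuts]
-- ===== SOURCE B (Python) =====
-- def rotateAndCut(message, numRepeats):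
--     def trim(s, i):
--         cut = len(s) // 4
--         if i >= numRepeats or cut == 0:
--             return s
--         return trim(s[cut:] if i % 2 == 0 else s[:len(s) - cut], i + 1)
--     return trim(message, 0)
-- ===== Notes on version B (the rewrite author's own statement) =====
-- stated objective: simpler
-- what changed: B drops the leftCuts/rightCuts/cutSize/remainder bookkeeping and the final slice: it recursively trims the actual substring, recomputing the cut from the current length, and returns the string it holds.
import Mathlib
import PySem

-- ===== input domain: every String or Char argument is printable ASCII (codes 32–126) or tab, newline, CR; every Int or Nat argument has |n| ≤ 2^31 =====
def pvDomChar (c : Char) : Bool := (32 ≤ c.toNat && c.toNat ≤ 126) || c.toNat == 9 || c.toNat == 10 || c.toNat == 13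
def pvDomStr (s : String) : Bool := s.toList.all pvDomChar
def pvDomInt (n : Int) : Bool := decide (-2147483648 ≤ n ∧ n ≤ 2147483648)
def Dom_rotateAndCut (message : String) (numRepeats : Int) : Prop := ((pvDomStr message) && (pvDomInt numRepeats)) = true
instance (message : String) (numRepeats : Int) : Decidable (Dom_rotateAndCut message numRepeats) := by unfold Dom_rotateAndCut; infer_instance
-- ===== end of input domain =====

-- B replaces A's four-counter bookkeeping (leftCuts/rightCuts/cutSize/remainder plus a final
-- slice) by recursively trimming the actual substring; objective: simpler.

-- ===== PORT A =====
-- A's loop: fuel = numRepeats.toNat (range(numRepeats)); state (i, leftCuts, rightCuts, cutSize, remainder).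
-- int(x*.25) is ported as floor division by 4: exact, since x here is a nonnegative int ≤ 2^53
-- (multiplication by .25 is exact there and int() truncates toward zero = floor on nonnegatives).
def rotALoop (fuel : Nat) (i leftCuts rightCuts cutSize remainder : Int) : Int × Int :=
  match fuel with
  | 0 => (leftCuts, rightCuts)
  | fuel + 1 =>
    if cutSize = 0 then (leftCuts, rightCuts)
    else if PySem.Int.band i 1 = 0 then
      rotALoop fuel (i + 1) (leftCuts + cutSize) rightCuts
        (PySem.Int.floordiv remainder 4) (remainder - PySem.Int.floordiv remainder 4)
    else
      rotALoop fuel (i + 1) leftCuts (rightCuts + cutSize)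
        (PySem.Int.floordiv remainder 4) (remainder - PySem.Int.floordiv remainder 4)

def rotateAndCut (message : String) (numRepeats : Int) : String :=
  let L := message.toList
  let n : Int := L.length
  let cutSize := PySem.Int.floordiv n 4
  let remainder := n - cutSize
  let p := rotALoop numRepeats.toNat 0 0 0 cutSize remainder
  String.ofList (PySem.List.slice L (some p.1) (some (n - p.2)))

-- ===== PORT B =====
-- trim(s, i) of Source B.  s[cut:] and s[:len(s)-cut] are ported as drop/take — exact here since the
-- bounds are nonnegative (PySem.List.slice_from_natCast / slice_to_natCast).
def rotBGo (s : List Char) (i : Int) (numRepeats : Int) : List Char :=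
  if numRepeats ≤ i ∨ s.length / 4 = 0 then s
  else rotBGo (if PySem.Int.mod i 2 = 0 then s.drop (s.length / 4)
               else s.take (s.length - s.length / 4)) (i + 1) numRepeats
termination_by s.length
decreasing_by
  simp_all
  split <;> simp <;> omega

def rotateAndCut_alt (message : String) (numRepeats : Int) : String :=
  String.ofList (rotBGo message.toList 0 numRepeats)

-- ===== PRECONDITION & SPEC =====
def Spec_rotateAndCut (message : String) (numRepeats : Int) (out : String) : Prop := out = rotateAndCut_alt message numRepeats
instance (message : String) (numRepeats : Int) (out : String) : Decidable (Spec_rotateAndCut message numRepeats out) := by unfold Spec_rotateAndCut; infer_instance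

-- ===== CLAIM (what is proved, stated in full; the proofs are below) =====
def Claim_equal_rotateAndCut : Prop := ∀ (message : String) (numRepeats : Int), Dom_rotateAndCut message numRepeats → Spec_rotateAndCut message numRepeats (rotateAndCut message numRepeats)

-- ===== LEMMAS AND PROOFS =====

-- PySem.Int.floordiv by 4 on a Nat cast is Nat division (numeral form of floordiv_natCast).
lemma floordiv_four_natCast (a : Nat) :
    PySem.Int.floordiv (a : Int) 4 = ((a / 4 : Nat) : Int) := by
  exact_mod_cast PySem.Int.floordiv_natCast a 4

-- i & 1 == 0 on a Nat cast is evenness of i % 2.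
lemma band_one_natCast (i : Nat) :
    PySem.Int.band (i : Int) 1 = ((i % 2 : Nat) : Int) := by
  have h := PySem.Int.band_natCast i 1
  simpa [Nat.and_one_is_mod] using h

-- Invariant: after l cuts on the left and r cuts on the right, A's counters describe exactly the
-- substring B holds, and A's (cutSize, remainder) are (len/4, len - len/4) of that substring.
lemma rotate_key : ∀ (fuel : Nat) (L : List Char) (i l r : Nat) (m : Int),
    m.toNat = i + fuel → l + r ≤ L.length →
    PySem.List.slice L
        (some (rotALoop fuel (i : Int) (l : Int) (r : Int)
          (((L.length - l - r) / 4 : Nat) : Int)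
          (((L.length - l - r : Nat) : Int) - (((L.length - l - r) / 4 : Nat) : Int))).1)
        (some ((L.length : Int) -
          (rotALoop fuel (i : Int) (l : Int) (r : Int)
            (((L.length - l - r) / 4 : Nat) : Int)
            (((L.length - l - r : Nat) : Int) - (((L.length - l - r) / 4 : Nat) : Int))).2))
      = rotBGo ((L.drop l).take (L.length - l - r)) (i : Int) m := by
  intro fuel
  induction fuel with
  | zero =>
    intro L i l r m hm hlr
    have hmi : m ≤ (i : Int) := by omega
    rw [rotBGo, if_pos (Or.inl hmi)]
    simp only [rotALoop]
    have hb : (L.length : Int) - (r : Int) = ((L.length - r : Nat) : Int) := by omega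
    have hsw : L.length - r - l = L.length - l - r := by omega
    rw [hb, PySem.List.slice_natCast, hsw]
  | succ fuel ih =>
    intro L i l r m hm hlr
    have hslen : ((L.drop l).take (L.length - l - r)).length = L.length - l - r := by
      simp
    by_cases hc : (L.length - l - r) / 4 = 0
    · -- cut size zero: both sides stop
      have hcz : (((L.length - l - r) / 4 : Nat) : Int) = 0 := by exact_mod_cast hc
      rw [rotBGo, if_pos (Or.inr (by rw [hslen]; exact hc))]
      simp only [rotALoop]
      rw [if_pos hcz]
      have hb : (L.length : Int) - (r : Int) = ((L.length - r : Nat) : Int) := by omega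
      have hsw : L.length - r - l = L.length - l - r := by omega
      rw [hb, PySem.List.slice_natCast, hsw]
    · -- one more trimming step
      have hmi : ¬ m ≤ (i : Int) := by omega
      have hcne : (((L.length - l - r) / 4 : Nat) : Int) ≠ 0 := by
        exact_mod_cast hc
      have hck : (L.length - l - r) / 4 ≤ L.length - l - r := Nat.div_le_self _ _
      have hrem : ((L.length - l - r : Nat) : Int) - (((L.length - l - r) / 4 : Nat) : Int)
          = ((L.length - l - r - (L.length - l - r) / 4 : Nat) : Int) := by omega
      have hmod2 : PySem.Int.mod (i : Int) 2 = ((i % 2 : Nat) : Int) := by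
        exact_mod_cast PySem.Int.mod_natCast i 2
      rw [rotBGo, if_neg (by rw [hslen]; exact not_or.mpr ⟨hmi, hc⟩), hslen]
      simp only [rotALoop]
      rw [if_neg hcne, band_one_natCast i]
      by_cases hpar : i % 2 = 0
      · -- even i: cut on the left
        rw [if_pos (by exact_mod_cast hpar), if_pos (by rw [hmod2]; exact_mod_cast hpar)]
        rw [hrem, floordiv_four_natCast]
        have hstep := ih L (i + 1) (l + (L.length - l - r) / 4) r m (by omega) (by omega)
        have hlen' : L.length - (l + (L.length - l - r) / 4) - r
            = L.length - l - r - (L.length - l - r) / 4 := by omega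
        have harg : (L.drop (l + (L.length - l - r) / 4)).take
              (L.length - l - r - (L.length - l - r) / 4)
            = ((L.drop l).take (L.length - l - r)).drop ((L.length - l - r) / 4) := by
          rw [List.drop_take, List.drop_drop]
        rw [hlen', harg] at hstep
        exact_mod_cast hstep
      · -- odd i: cut on the right
        rw [if_neg (by exact_mod_cast hpar), if_neg (by rw [hmod2]; exact_mod_cast hpar)]
        rw [hrem, floordiv_four_natCast]
        have hstep := ih L (i + 1) l (r + (L.length - l - r) / 4) m (by omega) (by omega)
        have hlen' : L.length - l - (r + (L.length - l - r) / 4)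
            = L.length - l - r - (L.length - l - r) / 4 := by omega
        have harg : (L.drop l).take (L.length - l - r - (L.length - l - r) / 4)
            = ((L.drop l).take (L.length - l - r)).take
                ((L.length - l - r) - (L.length - l - r) / 4) := by
          rw [List.take_take]
          congr 1
          omega
        rw [hlen', harg] at hstep
        exact_mod_cast hstep

theorem rotateAndCut_eq (message : String) (numRepeats : Int) :
    rotateAndCut message numRepeats = rotateAndCut_alt message numRepeats := by
  dsimp only [rotateAndCut, rotateAndCut_alt]
  have h := rotate_key numRepeats.toNat message.toList 0 0 0 numRepeats (by omega) (by omega)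
  simp only [Nat.sub_zero, List.drop_zero, List.take_length, Nat.cast_zero] at h
  rw [floordiv_four_natCast]
  exact congrArg String.ofList h

-- ===== VERDICT (by name: the statement is the Claim_ definition above) =====
theorem rotateAndCut_spec : Claim_equal_rotateAndCut := by
  intro message numRepeats _
  exact rotateAndCut_eq message numRepeats
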